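-- pv_equiv track=rewrite | github.com/gonza56d/dambrology | core/calculation.py | get_present_and_missing_numbers
-- ===== SOURCE A (Python) =====
-- letter_number = {
--     'a': 1, 'j': 1, 's': 1,
--     'b': 2, 'k': 2, 't': 2,
--     'c': 3, 'l': 3, 'u': 3,
--     'd': 4, 'm': 4, 'v': 4,
--     'e': 5, 'n': 5, 'w': 5,
--     'f': 6, 'o': 6, 'x': 6,
--     'g': 7, 'p': 7, 'y': 7,
--     'h': 8, 'q': 8, 'z': 8,
--     'i': 9, 'r': 9
-- }
--
-- def get_present_and_missing_numbers(full_name: str) -> tuple[list[int], list[int]]: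
--     """
--     Analyze all the numbers in the name for each letter.
--
--     Parameters:
--         full_name (str): The full name (first_name + last_name) of the person.
--
--     Returns:
--         tuple: first element is a list with the present numbers,
--             second element is a list with the missing numbers.
--     """
--     full_name = full_name.lower().replace(' ', '') if full_name is not None else None
--     result = ([], [number for number in range(1, 10)])
--     for letter in full_name:
--         present_number = letter_number[letter]
--         result[0].append(present_number)
--         if present_number in result[1]:
--             result[1].remove(present_number)
--     return result
-- ===== SOURCE B (Python) =====
-- def get_present_and_missing_numbers(full_name: str) -> tuple[list[int], list[int]]:
--     full_name = full_name.lower().replace(' ', '') if full_name is not None else None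
--     # numerology digit of a letter is its alphabet position mod 9, shifted to 1..9
--     present = [(ord(letter) - ord('a')) % 9 + 1 for letter in full_name]
--     missing = [number for number in range(1, 10) if number not in present]
--     return (present, missing)
-- ===== Notes on version B (the rewrite author's own statement) =====
-- stated objective: alternative
-- what changed: A maintains both lists in one interleaved loop with a dict lookup and in-place removals from the missing list; B drops the dict entirely, computing each digit by the closed formula (letter code minus 97) mod 9 plus 1 in one pass, then derives the missing list by a separate filtering pass over 1..9.
import Mathlib
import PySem

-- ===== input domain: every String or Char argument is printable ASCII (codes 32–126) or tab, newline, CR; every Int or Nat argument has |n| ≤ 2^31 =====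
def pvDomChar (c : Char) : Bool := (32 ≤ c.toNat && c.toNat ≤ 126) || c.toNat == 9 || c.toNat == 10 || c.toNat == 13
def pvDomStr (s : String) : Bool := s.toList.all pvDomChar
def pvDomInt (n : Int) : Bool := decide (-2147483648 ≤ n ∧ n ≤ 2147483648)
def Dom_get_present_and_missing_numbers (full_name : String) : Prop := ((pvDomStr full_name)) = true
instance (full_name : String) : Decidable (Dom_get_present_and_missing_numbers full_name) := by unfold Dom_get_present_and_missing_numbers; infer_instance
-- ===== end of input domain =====

-- B drops A's letter_number dict and interleaved remove-loop: it computes each digit by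
-- the closed formula (ord(c) - ord('a')) % 9 + 1 in one pass, then filters 1..9 in a second.

-- ===== PORT A =====
-- the module-level letter_number dict
def pvLetterDict : PySem.Dict Char Int := PySem.Dict.ofList
  [('a', 1), ('j', 1), ('s', 1),
   ('b', 2), ('k', 2), ('t', 2),
   ('c', 3), ('l', 3), ('u', 3),
   ('d', 4), ('m', 4), ('v', 4),
   ('e', 5), ('n', 5), ('w', 5),
   ('f', 6), ('o', 6), ('x', 6),
   ('g', 7), ('p', 7), ('y', 7),
   ('h', 8), ('q', 8), ('z', 8),
   ('i', 9), ('r', 9)]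

-- A's for-loop over the letters; letter_number[letter] raises KeyError on unmapped
-- characters — those inputs are excluded by Pre_, the .getD 0 fallback is never reached there
def pvLoopA : List Char → List Int × List Int → List Int × List Int
  | [], r => r
  | c :: rest, (p, m) =>
    let present_number : Int := (pvLetterDict.get? c).getD 0
    let p' := p ++ [present_number]
    let m' := if m.contains present_number
              then (PySem.List.remove? m present_number).getD m
              else m
    pvLoopA rest (p', m')

def get_present_and_missing_numbers (full_name : String) : List Int × List Int :=
  let fn := PySem.Str.replace (PySem.Str.lower full_name) " " ""
  pvLoopA fn.toList ([], PySem.List.pyRange 1 10 1)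

-- ===== PORT B =====
def get_present_and_missing_numbers_alt (full_name : String) : List Int × List Int :=
  let fn := PySem.Str.replace (PySem.Str.lower full_name) " " ""
  let present := fn.toList.map (fun c => PySem.Int.mod ((c.toNat : Int) - 97) 9 + 1)
  let missing := (PySem.List.pyRange 1 10 1).filter (fun n => !present.contains n)
  (present, missing)

-- ===== PRECONDITION & SPEC =====
-- Pre_ excludes exactly the inputs on which A raises KeyError: a character of the
-- lowered, space-stripped name that is not a key of letter_number
def Pre_get_present_and_missing_numbers (full_name : String) : Prop :=
  ((PySem.Str.replace (PySem.Str.lower full_name) " " "").toList.all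
    (fun c => pvLetterDict.contains c)) = true
instance (full_name : String) : Decidable (Pre_get_present_and_missing_numbers full_name) := by
  unfold Pre_get_present_and_missing_numbers; infer_instance

def pvWitness_get_present_and_missing_numbers : String := "Gonzalo Davila"

def Spec_get_present_and_missing_numbers (full_name : String) (out : List Int × List Int) : Prop := out = get_present_and_missing_numbers_alt full_name
instance (full_name : String) (out : List Int × List Int) : Decidable (Spec_get_present_and_missing_numbers full_name out) := by unfold Spec_get_present_and_missing_numbers; infer_instance

-- ===== CLAIM (what is proved, stated in full; the proofs are below) =====
def Claim_equal_get_present_and_missing_numbers : Prop := ∀ (full_name : String), Dom_get_present_and_missing_numbers full_name → Pre_get_present_and_missing_numbers full_name → Spec_get_present_and_missing_numbers full_name (get_present_and_missing_numbers full_name)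

-- ===== LEMMAS AND PROOFS =====

-- on every key of letter_number, the dict's value equals B's closed formula
theorem pv_char (c : Char) (h : pvLetterDict.contains c = true) :
    (pvLetterDict.get? c).getD 0 = PySem.Int.mod ((c.toNat : Int) - 97) 9 + 1 := by
  have hm : c ∈ pvLetterDict.keys := by
    simpa [PySem.Dict.contains_iff_mem_keys] using h
  fin_cases hm <;> decide

-- one loop step turns "missing = base minus p" into "missing = base minus (p ++ [n])"
theorem pv_step (base : List Int) (hb : base.Nodup) (p : List Int) (n : Int) :
    (if (base.filter (fun x => !p.contains x)).contains n
     then (PySem.List.remove? (base.filter (fun x => !p.contains x)) n).getD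
            (base.filter (fun x => !p.contains x))
     else base.filter (fun x => !p.contains x))
    = base.filter (fun x => !(p ++ [n]).contains x) := by
  by_cases h : (base.filter (fun x => !p.contains x)).contains n = true
  · rw [if_pos h]
    have hmem : n ∈ base.filter (fun x => !p.contains x) := by
      simpa using h
    rw [PySem.List.remove?_eq_some_erase _ _ hmem, Option.getD_some]
    have hnd : (base.filter (fun x => !p.contains x)).Nodup := hb.filter _
    rw [hnd.erase_eq_filter, List.filter_filter]
    refine List.filter_congr ?_
    intro x _
    simp only [List.contains_append, List.contains_cons, List.contains_nil]
    by_cases hxn : x = n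
    · subst hxn
      cases hpx : p.contains x <;> simp
    · cases hpx : p.contains x <;> simp [hxn, bne]
  · rw [if_neg h]
    refine List.filter_congr ?_
    intro x hx
    simp only [List.contains_append, List.contains_cons, List.contains_nil]
    by_cases hxn : x = n
    · subst hxn
      have hnot : x ∉ base.filter (fun y => !p.contains y) := by
        intro hc
        exact h (by simpa using hc)
      simp only [List.mem_filter, hx, true_and, Bool.not_eq_true'] at hnot
      have hpx : p.contains x = true := by simpa using hnot
      have hm : x ∈ p := by simpa using hpx
      simp [hm]
    · simp [hxn]

-- loop invariant: state (p, base minus p) maps to (p ++ map f t, base minus everything)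
theorem pv_loop_inv (t : List Char) (base : List Int) (hb : base.Nodup) (p : List Int) :
    pvLoopA t (p, base.filter (fun x => !p.contains x))
    = (p ++ t.map (fun c => (pvLetterDict.get? c).getD 0),
       base.filter (fun x => !(p ++ t.map (fun c => (pvLetterDict.get? c).getD 0)).contains x)) := by
  induction t generalizing p with
  | nil => simp [pvLoopA]
  | cons c rest ih =>
    show pvLoopA (c :: rest) (p, base.filter (fun x => !p.contains x)) = _
    rw [pvLoopA]
    rw [pv_step base hb p ((pvLetterDict.get? c).getD 0)]
    rw [ih (p ++ [(pvLetterDict.get? c).getD 0])]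
    simp

-- paste the invariant into the loop started from the initial state ([], range(1,10))
theorem pv_main (fn : List Char) :
    pvLoopA fn ([], PySem.List.pyRange 1 10 1)
    = (fn.map (fun c => (pvLetterDict.get? c).getD 0),
       (PySem.List.pyRange 1 10 1).filter
         (fun x => !(fn.map (fun c => (pvLetterDict.get? c).getD 0)).contains x)) := by
  have hb : (PySem.List.pyRange 1 10 1).Nodup := PySem.List.nodup_pyRange_one 1 10
  have h := pv_loop_inv fn (PySem.List.pyRange 1 10 1) hb []
  simp only [List.nil_append] at h
  have e : (PySem.List.pyRange 1 10 1).filter (fun x => !(([] : List Int).contains x))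
      = PySem.List.pyRange 1 10 1 := by simp
  rw [e] at h
  exact h

-- ===== VERDICT (by name: the statement is the Claim_ definition above) =====
theorem get_present_and_missing_numbers_spec : Claim_equal_get_present_and_missing_numbers := by
  intro full_name _ hpre
  show get_present_and_missing_numbers full_name = get_present_and_missing_numbers_alt full_name
  unfold get_present_and_missing_numbers get_present_and_missing_numbers_alt
  rw [pv_main]
  have hmap : (PySem.Str.replace (PySem.Str.lower full_name) " " "").toList.map
        (fun c => (pvLetterDict.get? c).getD 0)
      = (PySem.Str.replace (PySem.Str.lower full_name) " " "").toList.map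
        (fun c => PySem.Int.mod ((c.toNat : Int) - 97) 9 + 1) :=
    List.map_congr_left (fun c hc => pv_char c (by
      have := List.all_eq_true.mp hpre c hc
      simpa using this))
  rw [hmap]
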